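-- pv_equiv track=rewrite | github.com/jamil-said/code-samples | Python_code_challenges/digitRootSort.py | digitRootSort
-- ===== SOURCE A (Python) =====
-- def digitRootSort(a):
--     dr, drDic, tempLst, result  = 0, {}, [], []
--     for i, elem in enumerate(a):
--         dr = sum(map(int, str(elem)))
--         if dr in drDic: drDic[dr].append(i)
--         else: drDic[dr] = [i]
--         dr = 0
--     for key, value in drDic.items():
--         if len(value) == 1:
--             result.append(a[value[0]])
--         else:
--             for n in value:
--                 tempLst.append(a[n])
--             result.extend(sorted(tempLst))
--             tempLst = []
--     return result
-- ===== SOURCE B (Python) =====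
-- def digitRootSort(a):
--     rank = {}
--     for elem in a:
--         rank.setdefault(sum(map(int, str(elem))), len(rank))
--     return sorted(a, key=lambda x: (rank[sum(map(int, str(x)))], x))
-- ===== Notes on version B (the rewrite author's own statement) =====
-- stated objective: simpler
-- what changed: Replaced the index-list-per-digit-sum dict plus per-group sorting and concatenation with one dict recording each digit sum's first-appearance rank and a single stable sort on the composite key (rank, value).
import Mathlib
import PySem

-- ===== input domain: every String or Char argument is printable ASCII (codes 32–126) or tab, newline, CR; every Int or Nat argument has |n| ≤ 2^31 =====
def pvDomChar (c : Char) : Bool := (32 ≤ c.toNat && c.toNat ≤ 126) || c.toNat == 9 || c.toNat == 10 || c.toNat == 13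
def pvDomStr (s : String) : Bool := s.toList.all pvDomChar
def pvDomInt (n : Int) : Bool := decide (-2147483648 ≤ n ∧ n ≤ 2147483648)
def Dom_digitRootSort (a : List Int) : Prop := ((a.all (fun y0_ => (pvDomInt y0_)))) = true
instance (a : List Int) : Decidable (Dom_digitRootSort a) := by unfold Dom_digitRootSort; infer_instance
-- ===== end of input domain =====

-- B replaces A's per-digit-sum index lists and per-group sorts with one first-appearance-rank
-- dict and a single stable sort on the composite key (rank, value); objective: simpler.

-- ===== PORT A =====
-- shared helper: port of `sum(map(int, str(x)))` (appears verbatim in both A and B).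
-- int(c) is PySem.Int.ofChars? [c]; its `none` case (ValueError on the '-' of a negative
-- number) is replaced by 0 — inputs with negative elements are excluded by Pre_ below.
def pvDigitSum (x : Int) : Int :=
  ((PySem.Int.toChars x).map (fun c => (PySem.Int.ofChars? [c]).getD 0)).sum

def digitRootSort (a : List Int) : List Int :=
  let drDic : PySem.Dict Int (List Int) :=
    (PySem.List.enumerate a).foldl
      (fun d p =>
        if d.contains (pvDigitSum p.2) then
          d.insert (pvDigitSum p.2) (d.getD (pvDigitSum p.2) [] ++ [p.1])
        else d.insert (pvDigitSum p.2) [p.1])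
      PySem.Dict.empty
  (drDic.items.foldl
    (fun (st : List Int × List Int) kv =>
      if kv.2.length == 1 then
        (st.1, st.2 ++ [PySem.List.pyGetD a (PySem.List.pyGetD kv.2 0 0) 0])
      else
        (([] : List Int),
          st.2 ++ PySem.List.sorted
            (kv.2.foldl (fun t n => t ++ [PySem.List.pyGetD a n 0]) st.1) (fun x => x)))
    ([], [])).2

-- ===== PORT B =====
def digitRootSort_alt (a : List Int) : List Int :=
  let rank : PySem.Dict Int Int :=
    a.foldl (fun d elem => d.setdefault (pvDigitSum elem) ((d.size : Int))) PySem.Dict.empty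
  PySem.List.sorted2 a (fun x => rank.getD (pvDigitSum x) 0) (fun x => x)

-- ===== PRECONDITION & SPEC =====
-- Pre_ excludes lists with a negative element: there `sum(map(int, str(elem)))` raises
-- ValueError (int('-')) in A (and in B alike).
def Pre_digitRootSort (a : List Int) : Prop := ∀ x ∈ a, 0 ≤ x
instance (a : List Int) : Decidable (Pre_digitRootSort a) := by unfold Pre_digitRootSort; infer_instance
def pvWitness_digitRootSort : List Int := [12, 3, 21, 30, 5]

def Spec_digitRootSort (a : List Int) (out : List Int) : Prop := out = digitRootSort_alt a
instance (a : List Int) (out : List Int) : Decidable (Spec_digitRootSort a out) := by unfold Spec_digitRootSort; infer_instance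

-- ===== CLAIM (what is proved, stated in full; the proofs are below) =====
def Claim_equal_digitRootSort : Prop := ∀ (a : List Int), Dom_digitRootSort a → Pre_digitRootSort a → Spec_digitRootSort a (digitRootSort a)

-- ===== LEMMAS AND PROOFS =====

-- proof-side abbreviations
def dsKeys (a : List Int) : List Int := PySem.Set.ofList (a.map pvDigitSum)
def rankD (a : List Int) : PySem.Dict Int Int :=
  a.foldl (fun d elem => d.setdefault (pvDigitSum elem) ((d.size : Int))) PySem.Dict.empty
def rk (a : List Int) (x : Int) : Int := (rankD a).getD (pvDigitSum x) 0
def Rrel (a : List Int) (x y : Int) : Prop := rk a x < rk a y ∨ (rk a x = rk a y ∧ x ≤ y)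
def canon (a : List Int) : List Int :=
  (dsKeys a).flatMap (fun k => PySem.List.sorted (a.filter (fun x => pvDigitSum x == k)) (fun x => x))

-- rank-dict characterisation: keys in first-appearance order, value = position among the keys
theorem rankD_spec (a : List Int) :
    (rankD a).keys = dsKeys a ∧
      ∀ v : Int, (rankD a).get? v = (PySem.List.index? (dsKeys a) v).map (fun n => (n : Int)) := by
  induction a using List.reverseRecOn with
  | nil =>
    constructor
    · simp [rankD, dsKeys, PySem.Dict.keys_empty, PySem.Set.ofList]
    · intro v
      simp [rankD, dsKeys, PySem.Dict.get?_empty, PySem.Set.ofList, PySem.List.index?]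
  | append_singleton l x ih =>
    have hd : rankD (l ++ [x]) = (rankD l).setdefault (pvDigitSum x) (((rankD l).size : Int)) := by
      simp [rankD, List.foldl_append]
    have hk : dsKeys (l ++ [x]) = PySem.Set.add (dsKeys l) (pvDigitSum x) := by
      simp [dsKeys, List.map_append, PySem.Set.ofList_append_singleton]
    by_cases hc : (rankD l).contains (pvDigitSum x) = true
    · have hmem : pvDigitSum x ∈ dsKeys l := by
        rw [← ih.1]; exact (PySem.Dict.contains_iff_mem_keys _ _).mp hc
      rw [hd, PySem.Dict.setdefault_of_contains _ _ hc, hk, PySem.Set.add_of_mem hmem]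
      exact ih
    · have hc' : (rankD l).contains (pvDigitSum x) = false := by
        simpa using hc
      have hnm : pvDigitSum x ∉ dsKeys l := by
        rw [← ih.1]; intro hmem
        exact hc ((PySem.Dict.contains_iff_mem_keys _ _).mpr hmem)
      rw [hd, PySem.Dict.setdefault_of_not_contains _ _ hc', hk, PySem.Set.add_of_not_mem hnm]
      have hkeys : ((rankD l).insert (pvDigitSum x) (((rankD l).size : Int))).keys
          = (rankD l).keys ++ [pvDigitSum x] := by
        rw [PySem.Dict.keys_insert_of_not_contains _ _ hc']
      have hlen : (rankD l).size = (dsKeys l).length := by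
        have : (rankD l).keys.length = (rankD l).size := by
          simp [PySem.Dict.keys, PySem.Dict.size]
        rw [← this, ih.1]
      constructor
      · rw [hkeys, ih.1]
      · intro v
        by_cases hv : v = pvDigitSum x
        · subst hv
          rw [PySem.Dict.get?_insert_self,
            PySem.List.index?_append_singleton_self _ _ hnm, hlen]
          simp
        · rw [PySem.Dict.get?_insert_of_ne _ _ hv]
          by_cases hvm : v ∈ dsKeys l
          · rw [PySem.List.index?_append_of_mem _ hvm]; exact ih.2 v
          · have h1 : PySem.List.index? (dsKeys l) v = none :=
              (PySem.List.index?_eq_none_iff _ _).mpr hvm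
            have h2 : PySem.List.index? (dsKeys l ++ [pvDigitSum x]) v = none := by
              refine (PySem.List.index?_eq_none_iff _ _).mpr ?_
              simp [hvm, hv]
            rw [h2, ih.2 v, h1]

theorem rk_eq (a : List Int) (x : Int) :
    rk a x = ((PySem.List.index? (dsKeys a) (pvDigitSum x)).map (fun n => (n : Int))).getD 0 := by
  simp [rk, PySem.Dict.getD, (rankD_spec a).2]

theorem nodup_dsKeys (a : List Int) : (dsKeys a).Nodup :=
  PySem.Set.nodup_ofList _

theorem mem_dsKeys_of_mem {a : List Int} {x : Int} (hx : x ∈ a) : pvDigitSum x ∈ dsKeys a := by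
  rw [dsKeys, PySem.Set.mem_ofList]
  exact List.mem_map_of_mem hx

-- index? of the i-th element of a Nodup list
theorem index?_getElem_of_nodup {l : List Int} (h : l.Nodup) (i : Nat) (hi : i < l.length) :
    PySem.List.index? l l[i] = some i := by
  refine (PySem.List.index?_eq_some_iff _ _ _).mpr ?_
  refine ⟨l.take i, l.drop (i + 1), ?_, by simp [hi.le], ?_⟩
  · conv_lhs => rw [← List.take_append_drop i l]
    rw [List.drop_eq_getElem_cons hi]
  · intro hmem
    obtain ⟨j, hj, hji⟩ := List.mem_take_iff_getElem.mp hmem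
    exact absurd (List.Nodup.getElem_inj_iff h |>.mp hji)
      (by omega)

-- insertion sort produces a Pairwise-R list
theorem pairwise_insertBy {R : Int → Int → Prop} {before : Int → Int → Bool}
    (h1 : ∀ x y, before x y = true → R x y) (h2 : ∀ x y, before x y = false → R y x)
    (ht : ∀ {x y z : Int}, R x y → R y z → R x z)
    (x : Int) (ys : List Int) (hys : ys.Pairwise R) :
    (PySem.List.insertBy before x ys).Pairwise R := by
  induction ys with
  | nil => simp [PySem.List.insertBy]
  | cons y ys ih =>
    rw [show PySem.List.insertBy before x (y :: ys)
        = if before x y then x :: y :: ys else y :: PySem.List.insertBy before x ys from rfl]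
    by_cases hb : before x y = true
    · rw [if_pos hb]
      refine List.Pairwise.cons ?_ hys
      intro z hz
      rcases List.mem_cons.mp hz with rfl | hz
      · exact h1 _ _ hb
      · exact ht (h1 _ _ hb) (List.rel_of_pairwise_cons hys hz)
    · rw [if_neg hb]
      have hyx : R y x := h2 _ _ (by simpa using hb)
      refine List.Pairwise.cons ?_ (ih (hys.sublist (List.sublist_cons_self _ _)))
      intro z hz
      have : z = x ∨ z ∈ ys := (PySem.List.mem_insertBy before x z ys).mp hz
      rcases this with rfl | hz'
      · exact hyx
      · exact List.rel_of_pairwise_cons hys hz' 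

theorem pairwise_foldl_insertBy {R : Int → Int → Prop} {before : Int → Int → Bool}
    (h1 : ∀ x y, before x y = true → R x y) (h2 : ∀ x y, before x y = false → R y x)
    (ht : ∀ {x y z : Int}, R x y → R y z → R x z)
    (xs : List Int) (acc : List Int) (hacc : acc.Pairwise R) :
    (xs.foldl (fun acc x => PySem.List.insertBy before x acc) acc).Pairwise R := by
  induction xs generalizing acc with
  | nil => exact hacc
  | cons x xs ih =>
    exact ih _ (pairwise_insertBy h1 h2 ht x acc hacc)

theorem pairwise_sorted2_rk (a : List Int) :
    (PySem.List.sorted2 a (rk a) (fun x => x)).Pairwise (Rrel a) := by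
  have hs : PySem.List.sorted2 a (rk a) (fun x => x)
      = a.foldl (fun acc x => PySem.List.insertBy
          (fun p q => decide (rk a p < rk a q) || (!decide (rk a q < rk a p) && decide (p < q)))
          x acc) [] := rfl
  rw [hs]
  refine pairwise_foldl_insertBy ?_ ?_ ?_ a [] (by simp)
  · intro x y h
    simp only [Bool.or_eq_true, Bool.and_eq_true, Bool.not_eq_eq_eq_not, Bool.not_true,
      decide_eq_true_eq, decide_eq_false_iff_not] at h
    unfold Rrel; omega
  · intro x y h
    simp only [Bool.or_eq_false_iff, Bool.and_eq_false_iff, Bool.not_eq_eq_eq_not, Bool.not_false,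
      decide_eq_true_eq, decide_eq_false_iff_not] at h
    unfold Rrel; omega
  · intro x y z hxy hyz
    unfold Rrel at hxy hyz ⊢; omega

-- the partition permutation
theorem perm_flatMap_filter (f : Int → Int) :
    ∀ (keys : List Int) (l : List Int), keys.Nodup → (∀ x ∈ l, f x ∈ keys) →
      (keys.flatMap (fun k => l.filter (fun x => f x == k))).Perm l := by
  intro keys
  induction keys with
  | nil =>
    intro l _ hcov
    cases l with
    | nil => simp
    | cons x t => exact absurd (hcov x (List.mem_cons_self)) (by simp)
  | cons k ks ih =>
    intro l hnd hcov
    rw [List.flatMap_cons]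
    have hre : ∀ k' ∈ ks, l.filter (fun x => f x == k')
        = (l.filter (fun x => !(f x == k))).filter (fun x => f x == k') := by
      intro k' hk'
      have hne : k' ≠ k := fun h => (List.nodup_cons.mp hnd).1 (h ▸ hk')
      rw [List.filter_filter]
      refine (List.filter_congr ?_).symm
      intro x _
      by_cases hfx : f x = k'
      · simp [hfx, hne]
      · simp [hfx]
    have hmapeq : ks.map (fun k' => l.filter (fun x => f x == k'))
        = ks.map (fun k' => (l.filter (fun x => !(f x == k))).filter (fun x => f x == k')) :=
      List.map_congr_left hre
    rw [List.flatMap_def, hmapeq, ← List.flatMap_def]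
    have hcov' : ∀ x ∈ l.filter (fun x => !(f x == k)), f x ∈ ks := by
      intro x hx
      obtain ⟨hxl, hxk⟩ := List.mem_filter.mp hx
      have := hcov x hxl
      rcases List.mem_cons.mp this with h | h
      · exact absurd h (by simpa using hxk)
      · exact h
    have hperm := ih (l.filter (fun x => !(f x == k))) (List.nodup_cons.mp hnd).2 hcov'
    exact ((List.Perm.refl _).append hperm).trans (List.filter_append_perm _ l)

theorem canon_perm (a : List Int) : (canon a).Perm a := by
  have h1 : ∀ keys : List Int,
      (keys.flatMap (fun k => PySem.List.sorted (a.filter (fun x => pvDigitSum x == k)) (fun x => x))).Perm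
        (keys.flatMap (fun k => a.filter (fun x => pvDigitSum x == k))) := by
    intro keys
    induction keys with
    | nil => simp
    | cons k ks ih =>
      rw [List.flatMap_cons, List.flatMap_cons]
      exact (PySem.List.sorted_perm _ _ _).append ih
  exact (h1 (dsKeys a)).trans
    (perm_flatMap_filter pvDigitSum (dsKeys a) a (nodup_dsKeys a) (fun x hx => mem_dsKeys_of_mem hx))

theorem rk_of_ds_eq {a : List Int} {x k : Int} (hk : pvDigitSum x = k) (i : Nat)
    (hi : i < (dsKeys a).length) (hik : (dsKeys a)[i] = k) : rk a x = (i : Int) := by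
  rw [rk_eq, hk, ← hik, index?_getElem_of_nodup (nodup_dsKeys a) i hi]
  simp

theorem canon_pairwise (a : List Int) : (canon a).Pairwise (Rrel a) := by
  unfold canon
  rw [List.pairwise_flatMap]
  constructor
  · intro k hk
    obtain ⟨i, hi, hik⟩ := List.mem_iff_getElem.mp hk
    refine (PySem.List.sorted_pairwise _ _).imp_of_mem ?_
    intro x y hx hy hxy
    have hdx : pvDigitSum x = k :=
      by simpa using (List.mem_filter.mp ((PySem.List.mem_sorted _ _ _ _).mp hx)).2
    have hdy : pvDigitSum y = k :=
      by simpa using (List.mem_filter.mp ((PySem.List.mem_sorted _ _ _ _).mp hy)).2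
    right
    exact ⟨by rw [rk_of_ds_eq hdx i hi hik, rk_of_ds_eq hdy i hi hik], hxy⟩
  · rw [List.pairwise_iff_getElem]
    intro i j hi hj hij x hx y hy
    have hdx : pvDigitSum x = (dsKeys a)[i] :=
      by simpa using (List.mem_filter.mp ((PySem.List.mem_sorted _ _ _ _).mp hx)).2
    have hdy : pvDigitSum y = (dsKeys a)[j] :=
      by simpa using (List.mem_filter.mp ((PySem.List.mem_sorted _ _ _ _).mp hy)).2
    left
    rw [rk_of_ds_eq hdx i hi rfl, rk_of_ds_eq hdy j hj rfl]
    exact_mod_cast hij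

-- A-side reduction
theorem enum_spec : ∀ (a : List Int) (s : Int) (p : Int × Int), p ∈ PySem.List.enumerate a s →
    ∃ (j : Nat), p.1 = s + j ∧ a[j]? = some p.2 := by
  intro a
  induction a with
  | nil => intro s p hp; simp [PySem.List.enumerate] at hp
  | cons x t ih =>
    intro s p hp
    rw [PySem.List.enumerate_cons] at hp
    rcases List.mem_cons.mp hp with rfl | hp
    · exact ⟨0, by simp⟩
    · obtain ⟨j, hj1, hj2⟩ := ih (s + 1) p hp
      exact ⟨j + 1, by push_cast; omega, by simpa using hj2⟩

theorem enum_filter_map_snd (P : Int → Bool) :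
    ∀ (a : List Int) (s : Int),
      ((PySem.List.enumerate a s).filter (fun p => P p.2)).map (fun p => p.2) = a.filter P := by
  intro a
  induction a with
  | nil => intro s; simp [PySem.List.enumerate]
  | cons x t ih =>
    intro s
    rw [PySem.List.enumerate_cons]
    by_cases hp : P x = true
    · simp [hp, ih (s + 1)]
    · simp [hp, ih (s + 1)]

theorem enum_map_snd (g : Int → Int) :
    ∀ (a : List Int) (s : Int), (PySem.List.enumerate a s).map (fun p => g p.2) = a.map g := by
  intro a
  induction a with
  | nil => intro s; simp [PySem.List.enumerate]
  | cons x t ih =>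
    intro s
    rw [PySem.List.enumerate_cons]
    simp [ih (s + 1)]

-- the second loop of A appends, group by group, the sorted list of that group's values
theorem loop2 (a : List Int) (items : List (Int × List Int)) : ∀ (res : List Int),
    (items.foldl (fun (st : List Int × List Int) kv =>
      if kv.2.length == 1 then
        (st.1, st.2 ++ [PySem.List.pyGetD a (PySem.List.pyGetD kv.2 0 0) 0])
      else
        (([] : List Int),
          st.2 ++ PySem.List.sorted
            (kv.2.foldl (fun t n => t ++ [PySem.List.pyGetD a n 0]) st.1) (fun x => x)))
      ([], res)).2
    = res ++ items.flatMap
        (fun kv => PySem.List.sorted (kv.2.map (fun n => PySem.List.pyGetD a n 0)) (fun x => x)) := by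
  induction items with
  | nil => intro res; simp
  | cons kv rest ih =>
    intro res
    rw [List.foldl_cons, List.flatMap_cons]
    by_cases h1 : kv.2.length = 1
    · obtain ⟨n, hn⟩ := List.length_eq_one_iff.mp h1
      rw [if_pos (by simp [h1]), hn]
      have hv : PySem.List.pyGetD ([n] : List Int) 0 0 = n := by
        simp [PySem.List.pyGetD]
      rw [hv, ih (res ++ [PySem.List.pyGetD a n 0])]
      have hs : PySem.List.sorted (([n] : List Int).map (fun n => PySem.List.pyGetD a n 0))
          (fun x => x) = [PySem.List.pyGetD a n 0] := rfl
      rw [hs, List.append_assoc]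
    · rw [if_neg (by simp [h1])]
      rw [PySem.List.foldl_append_singleton_eq_map (fun n => PySem.List.pyGetD a n 0) kv.2 []]
      rw [ih, List.nil_append, List.append_assoc]

theorem A_eq_canon (a : List Int) : digitRootSort a = canon a := by
  have hstep : (fun (d : PySem.Dict Int (List Int)) (p : Int × Int) =>
        if d.contains (pvDigitSum p.2) then
          d.insert (pvDigitSum p.2) (d.getD (pvDigitSum p.2) [] ++ [p.1])
        else d.insert (pvDigitSum p.2) [p.1])
      = fun d p => d.modify (pvDigitSum p.2) [] (fun v => v ++ [p.1]) := by
    funext d p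
    by_cases hc : d.contains (pvDigitSum p.2) = true
    · simp [hc, PySem.Dict.modify]
    · have hc' : d.contains (pvDigitSum p.2) = false := by simpa using hc
      simp [hc', PySem.Dict.modify, PySem.Dict.getD_of_not_contains _ _ hc']
  set D : PySem.Dict Int (List Int) :=
    (PySem.List.enumerate a).foldl
      (fun d p => d.modify (pvDigitSum p.2) [] (fun v => v ++ [p.1])) PySem.Dict.empty with hD
  have e1 : digitRootSort a
      = ((D.items.foldl (fun (st : List Int × List Int) kv =>
          if kv.2.length == 1 then
            (st.1, st.2 ++ [PySem.List.pyGetD a (PySem.List.pyGetD kv.2 0 0) 0])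
          else
            (([] : List Int),
              st.2 ++ PySem.List.sorted
                (kv.2.foldl (fun t n => t ++ [PySem.List.pyGetD a n 0]) st.1) (fun x => x)))
        ([], [])).2) := by
    simp only [digitRootSort, hstep, hD]
  have hkeys : D.keys = dsKeys a := by
    rw [hD, PySem.Dict.keys_foldl_modify_key (PySem.List.enumerate a)
        (fun p => pvDigitSum p.2) [] (fun _ p v => v ++ [p.1]) PySem.Dict.empty,
      PySem.Dict.keys_empty, PySem.Set.update_nil_left, enum_map_snd pvDigitSum a 0]
    rfl
  have hnodup : D.keys.Nodup := by
    rw [hD]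
    exact PySem.Dict.nodup_keys_foldl_modify_key _ _ _ _ _ (by rw [PySem.Dict.keys_empty]; simp)
  have hgetD : ∀ k : Int, D.getD k []
      = ((PySem.List.enumerate a).filter (fun p => pvDigitSum p.2 == k)).map (fun p => p.1) := by
    intro k
    have h := PySem.Dict.getD_foldl_modify_append
      ((PySem.List.enumerate a).map (fun p => (pvDigitSum p.2, p.1))) PySem.Dict.empty k
    rw [List.foldl_map] at h
    rw [hD]
    simp only [List.filter_map, List.map_map] at h
    rw [h, PySem.Dict.getD_empty, List.nil_append]
    rfl
  have hitems : D.items = (dsKeys a).map (fun k => (k, D.getD k [])) := by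
    rw [← hkeys]; exact PySem.Dict.items_eq_map_keys D hnodup []
  have hgrp : ∀ k : Int,
      (((PySem.List.enumerate a).filter (fun p => pvDigitSum p.2 == k)).map (fun p => p.1)).map
          (fun n => PySem.List.pyGetD a n 0)
        = a.filter (fun x => pvDigitSum x == k) := by
    intro k
    rw [List.map_map]
    have hcong : ∀ p ∈ (PySem.List.enumerate a).filter (fun p => pvDigitSum p.2 == k),
        ((fun n => PySem.List.pyGetD a n 0) ∘ fun p : Int × Int => p.1) p = p.2 := by
      intro p hp
      obtain ⟨j, hj1, hj2⟩ := enum_spec a 0 p (List.mem_filter.mp hp).1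
      simp only [Function.comp]
      rw [hj1, zero_add, PySem.List.pyGetD_natCast, List.getD_eq_getElem?_getD, hj2]
      rfl
    rw [List.map_congr_left hcong]
    exact enum_filter_map_snd (fun x => pvDigitSum x == k) a 0
  rw [e1, loop2 a D.items [], List.nil_append, hitems, List.flatMap_map]
  unfold canon
  have hfun : (fun k => PySem.List.sorted ((D.getD k []).map (fun n => PySem.List.pyGetD a n 0))
        (fun x => x))
      = fun k => PySem.List.sorted (a.filter (fun x => pvDigitSum x == k)) (fun x => x) :=
    funext fun k => by rw [hgetD k, hgrp k]
  rw [hfun]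

theorem B_pairwise_le (a : List Int) {x y : Int} (h : Rrel a x y) :
    (toLex (rk a x, x) : Lex (Int × Int)) ≤ toLex (rk a y, y) := by
  rw [Prod.Lex.le_iff]
  simpa using h

theorem digitRootSort_eq_sorted2 (a : List Int) :
    digitRootSort_alt a = PySem.List.sorted2 a (rk a) (fun x => x) := rfl

theorem main_eq (a : List Int) : digitRootSort a = digitRootSort_alt a := by
  rw [A_eq_canon, digitRootSort_eq_sorted2]
  refine PySem.List.eq_of_perm_of_pairwise_le_of_injective
    (fun x => (toLex (rk a x, x) : Lex (Int × Int))) ?_ ?_ ?_ ?_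
  · intro x y h
    simpa using congrArg (fun z : Lex (Int × Int) => (ofLex z).2) h
  · exact (canon_perm a).trans (PySem.List.sorted2_perm a (rk a) (fun x => x) false).symm
  · exact (canon_pairwise a).imp (fun h => B_pairwise_le a h)
  · exact (pairwise_sorted2_rk a).imp (fun h => B_pairwise_le a h)

-- ===== VERDICT (by name: the statement is the Claim_ definition above) =====
theorem digitRootSort_spec : Claim_equal_digitRootSort := by
  intro a _ _
  unfold Spec_digitRootSort
  exact main_eq a
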